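-- pv_equiv track=rewrite | github.com/casuallysentient/lab_06 | goat_latin.py | translate_sentence_to_goat_latin
-- ===== SOURCE A (Python) =====
-- def translate_sentence_to_goat_latin(original_sentence):
--     original_word = ""
--     new_sentence = ""
--     word_number = 1
--     vowels = "aeiouAEIOU"
--     for x in range(len(original_sentence)):
--         if original_sentence[x] == " ":
--             if original_word[0] in vowels:
--                 new_word = original_word + "ma"
--             else:
--                 new_word = original_word + original_word[0] + "ma"
--                 new_word = new_word[1:]
--             for y in range(word_number):
--                 new_word = new_word + "a"
--             new_sentence += new_word
--             original_word = ""
--             new_word = ""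
--             new_sentence += " "
--             word_number += 1
--             continue
--         if x == len(original_sentence) - 1:
--             original_word += original_sentence[x]
--             if original_word[0] in vowels:
--                 new_word = original_word + "ma"
--             else:
--                 new_word = original_word + original_word[0] + "ma"
--                 new_word = new_word[1:]
--             for y in range(word_number):
--                 new_word = new_word + "a"
--             new_sentence += new_word
--             return new_sentence
--         original_word += original_sentence[x]
-- ===== SOURCE B (Python) =====
-- def translate_sentence_to_goat_latin(original_sentence):
--     vowels = "aeiouAEIOU"
--     words = []
--     for i, w in enumerate(original_sentence.split(" ")):
--         g = w + "ma" if w[0] in vowels else w[1:] + w[0] + "ma"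
--         words.append(g + "a" * (i + 1))
--     return " ".join(words)
-- ===== Notes on version B (the rewrite author's own statement) =====
-- stated objective: idiomatic
-- what changed: Replaces A's manual character-by-character scan with mutable word/sentence string accumulators and an inner count loop by the idiomatic split(" ")/enumerate/join decomposition with a per-word expression (join avoids A's repeated string concatenation).
-- outside the precondition, e.g. on translate_sentence_to_goat_latin('a '): A returns None, B raises IndexError; on translate_sentence_to_goat_latin(''): A returns None, B raises IndexError; on translate_sentence_to_goat_latin(' '): A raises IndexError, B raises IndexError
import Mathlib
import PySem

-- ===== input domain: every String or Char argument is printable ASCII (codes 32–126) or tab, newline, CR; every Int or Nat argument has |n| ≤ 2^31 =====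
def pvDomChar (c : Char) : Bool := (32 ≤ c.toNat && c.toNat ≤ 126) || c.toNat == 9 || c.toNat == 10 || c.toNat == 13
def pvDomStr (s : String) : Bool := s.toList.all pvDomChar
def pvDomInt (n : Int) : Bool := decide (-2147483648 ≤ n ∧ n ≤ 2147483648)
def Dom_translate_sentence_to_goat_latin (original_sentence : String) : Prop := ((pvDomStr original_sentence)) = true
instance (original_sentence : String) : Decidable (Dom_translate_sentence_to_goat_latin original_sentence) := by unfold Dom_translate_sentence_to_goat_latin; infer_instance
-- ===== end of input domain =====

-- B re-implements A's char-by-char scan as the idiomatic split/enumerate/join decomposition; equal return values on Pre_ (A falls off its loop, returning None, on empty input or a trailing space, and raises IndexError on an empty non-final segment — excluded by Pre_).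

-- ===== PORT A =====
def pvVowels : List Char := ['a','e','i','o','u','A','E','I','O','U']

-- A's per-word block: build new_word from original_word, then the 'for y in range(word_number)' loop of 'a's
def pvGoatA (ow : List Char) (wn : Nat) : List Char :=
  let nw := if ow.headD ' ' ∈ pvVowels then ow ++ ['m','a']
            else (ow ++ [ow.headD ' '] ++ ['m','a']).drop 1
  (List.range wn).foldl (fun s _ => s ++ ['a']) nw

-- A's index loop 'for x in range(len(...))' as structural recursion on the remaining characters,
-- with the same state (original_word, new_sentence, word_number); the 'x == len-1' test is 'rest = []'.
-- Falling off the loop (Python returns None) yields []; those inputs are outside Pre_.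
def pvLoopA : List Char → List Char → List Char → Nat → List Char
  | [], _, _, _ => []
  | c :: rest, ow, ns, wn =>
    if c = ' ' then pvLoopA rest [] (ns ++ pvGoatA ow wn ++ [' ']) (wn + 1)
    else if rest = [] then ns ++ pvGoatA (ow ++ [c]) wn
    else pvLoopA rest (ow ++ [c]) ns wn

def translate_sentence_to_goat_latin (original_sentence : String) : String :=
  String.ofList (pvLoopA original_sentence.toList [] [] 1)

-- ===== PORT B =====
def pvGoatB (w : List Char) (i : Nat) : List Char :=
  (if w.headD ' ' ∈ pvVowels then w ++ ['m','a'] else w.drop 1 ++ [w.headD ' '] ++ ['m','a'])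
    ++ List.replicate (i + 1) 'a'

def translate_sentence_to_goat_latin_alt (original_sentence : String) : String :=
  let words := (PySem.Chars.splitOn original_sentence.toList [' ']).zipIdx.map
      (fun p => pvGoatB p.1 p.2)
  String.ofList (PySem.Chars.join [' '] words)

-- ===== PRECONDITION & SPEC =====
-- Pre_ excludes exactly the inputs with an empty space-separated segment: empty string, leading/trailing
-- space, or a double space — there A either raises IndexError or falls off its loop returning None.
def Pre_translate_sentence_to_goat_latin (original_sentence : String) : Prop :=
  [] ∉ PySem.Chars.splitOn original_sentence.toList [' ']
instance (original_sentence : String) : Decidable (Pre_translate_sentence_to_goat_latin original_sentence) := by unfold Pre_translate_sentence_to_goat_latin; infer_instance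
def pvWitness_translate_sentence_to_goat_latin : String := "I speak Goat"

def Spec_translate_sentence_to_goat_latin (original_sentence : String) (out : String) : Prop := out = translate_sentence_to_goat_latin_alt original_sentence
instance (original_sentence : String) (out : String) : Decidable (Spec_translate_sentence_to_goat_latin original_sentence out) := by unfold Spec_translate_sentence_to_goat_latin; infer_instance

-- ===== CLAIM (what is proved, stated in full; the proofs are below) =====
def Claim_equal_translate_sentence_to_goat_latin : Prop := ∀ (original_sentence : String), Dom_translate_sentence_to_goat_latin original_sentence → Pre_translate_sentence_to_goat_latin original_sentence → Spec_translate_sentence_to_goat_latin original_sentence (translate_sentence_to_goat_latin original_sentence)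

-- ===== LEMMAS AND PROOFS =====

/-- The space-separated segments of `pre ++ l`, where `pre` is the partial current segment. -/
def pvSegs : List Char → List Char → List (List Char)
  | pre, [] => [pre]
  | pre, c :: t => if c = ' ' then pre :: pvSegs [] t else pvSegs (pre ++ [c]) t

theorem pvSegs_ne_nil (pre l : List Char) : pvSegs pre l ≠ [] := by
  induction l generalizing pre with
  | nil => simp [pvSegs]
  | cons c t ih => simp only [pvSegs]; split <;> simp [ih]

theorem pvSplitOn_go_eq (l : List Char) : ∀ (fuel : Nat) (cur : List Char) (out : List (List Char)),
    l.length < fuel →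
    PySem.Chars.splitOn.go [' '] fuel l cur out = out.reverse ++ pvSegs cur.reverse l := by
  induction l with
  | nil =>
    intro fuel cur out h
    match fuel, h with
    | fuel + 1, _ => simp [PySem.Chars.splitOn.go, pvSegs]
  | cons c t ih =>
    intro fuel cur out h
    match fuel, h with
    | fuel + 1, h =>
      by_cases hc : c = ' '
      · subst hc
        have : List.isPrefixOf [' '] (' ' :: t) = true := by simp [List.isPrefixOf]
        simp only [PySem.Chars.splitOn.go, if_pos this]
        rw [show List.drop (List.length [' ']) (' ' :: t) = t by simp]
        rw [ih fuel [] (cur.reverse :: out) (by simpa using h)]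
        simp [pvSegs]
      · have : List.isPrefixOf [' '] (c :: t) = false := by
          simp [List.isPrefixOf]; exact fun h' => absurd h'.symm hc
        simp only [PySem.Chars.splitOn.go, this]
        rw [if_neg (by simp)]
        rw [ih fuel (c :: cur) out (by simpa using h)]
        simp [pvSegs, hc]

theorem pvSplitOn_eq (cs : List Char) : PySem.Chars.splitOn cs [' '] = pvSegs [] cs := by
  unfold PySem.Chars.splitOn
  simpa using pvSplitOn_go_eq cs (cs.length + 1) [] [] (by omega)

/-- A's word transform with count `i + 1` equals B's word transform at index `i`, for nonempty words. -/
theorem pvGoat_eq (w : List Char) (i : Nat) (hw : w ≠ []) : pvGoatA w (i + 1) = pvGoatB w i := by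
  obtain ⟨c, t, rfl⟩ := List.exists_cons_of_ne_nil hw
  simp only [pvGoatA, pvGoatB]
  rw [PySem.List.foldl_append_singleton_eq_map]
  simp

/-- Goat-Latin join of the word list `ws`, first word numbered `n`. -/
def pvJoinG : Nat → List (List Char) → List Char
  | _, [] => []
  | n, [w] => pvGoatA w n
  | n, w :: w' :: ws => pvGoatA w n ++ ' ' :: pvJoinG (n + 1) (w' :: ws)

theorem pvLoopA_eq (cs : List Char) : ∀ (ow ns : List Char) (wn : Nat),
    cs ≠ [] → [] ∉ pvSegs ow cs →
    pvLoopA cs ow ns wn = ns ++ pvJoinG wn (pvSegs ow cs) := by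
  induction cs with
  | nil => intro _ _ _ h; exact absurd rfl h
  | cons c rest ih =>
    intro ow ns wn _ hseg
    by_cases hc : c = ' '
    · simp only [pvSegs, if_pos hc] at hseg ⊢
      match rest, hseg with
      | [], hseg => simp [pvSegs] at hseg
      | r :: rest, hseg =>
        rw [show pvLoopA (c :: r :: rest) ow ns wn
              = pvLoopA (r :: rest) [] (ns ++ pvGoatA ow wn ++ [' ']) (wn + 1) by
            simp only [pvLoopA, if_pos hc]]
        rw [ih [] (ns ++ pvGoatA ow wn ++ [' ']) (wn + 1) (by simp)
            (by intro h; exact hseg (List.mem_cons.mpr (Or.inr h)))]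
        obtain ⟨w, ws, hw⟩ := List.exists_cons_of_ne_nil (pvSegs_ne_nil [] (r :: rest))
        rw [hw]
        simp [pvJoinG]
    · simp only [pvSegs, if_neg hc] at hseg ⊢
      match rest with
      | [] =>
        simp [pvLoopA, hc, pvSegs, pvJoinG]
      | r :: rest =>
        simp only [pvLoopA, if_neg hc]
        rw [if_neg (by simp)]
        exact ih (ow ++ [c]) ns wn (by simp) hseg

/-- B's enumerate-map-join equals the numbered join, for nonempty words. -/
theorem pvJoinB_eq (ws : List (List Char)) : ∀ (k : Nat), [] ∉ ws →
    PySem.Chars.join [' '] ((ws.zipIdx k).map (fun p => pvGoatB p.1 p.2)) = pvJoinG (k + 1) ws := by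
  induction ws with
  | nil => intro k _; simp [pvJoinG, PySem.Chars.join, List.intercalate]
  | cons w ws ih =>
    intro k hne
    have hw : w ≠ [] := fun h => hne (h ▸ List.mem_cons_self ..)
    match ws with
    | [] =>
      simp [List.zipIdx, pvJoinG, PySem.Chars.join_singleton, pvGoat_eq w k hw]
    | w' :: ws =>
      simp only [List.zipIdx, List.map_cons]
      rw [PySem.Chars.join_cons_cons]
      have h2 := ih (k + 1) (fun h => hne (List.mem_cons_of_mem _ h))
      simp only [List.zipIdx, List.map_cons] at h2
      rw [h2, ← pvGoat_eq w k hw]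
      simp [pvJoinG]

-- ===== VERDICT (by name: the statement is the Claim_ definition above) =====
theorem translate_sentence_to_goat_latin_spec : Claim_equal_translate_sentence_to_goat_latin := by
  intro s _ hpre
  unfold Pre_translate_sentence_to_goat_latin at hpre
  unfold Spec_translate_sentence_to_goat_latin
  rw [pvSplitOn_eq] at hpre
  have hcs : s.toList ≠ [] := by intro h; rw [h] at hpre; simp [pvSegs] at hpre
  have hB : translate_sentence_to_goat_latin_alt s = String.ofList (pvJoinG 1 (pvSegs [] s.toList)) := by
    show String.ofList (PySem.Chars.join [' ']
      (((PySem.Chars.splitOn s.toList [' ']).zipIdx 0).map (fun p => pvGoatB p.1 p.2))) = _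
    rw [pvSplitOn_eq, pvJoinB_eq _ 0 hpre]
  rw [hB]
  show String.ofList (pvLoopA s.toList [] [] 1) = _
  rw [pvLoopA_eq s.toList [] [] 1 hcs hpre]
  rfl
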